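-- pv_equiv track=rewrite | github.com/robolab-pavia/slr-kit | preprocess.py | replace_ngram
-- ===== SOURCE A (Python) =====
-- def replace_ngram(text, n_grams):
--     """
--     Replace the given n-grams with a placeholder in the specified text
--
--     The n-grams and their placeholder are taken from the generator n_grams, that
--     must be a generator that yields a tuple (placeholder, n-gram). Each n-gram
--     must be a tuple of strings.
--     The function can also check if the toke immediately after the replaced
--     n-gram is equal to the placeholder to remove it. This is useful for acronyms
--     because, usually the abbreviation immediately follows the extended acronym.
--
--     :param text: the text to search
--     :type text: list[str]
--     :param n_grams: generator that yields n-grams and their placeholder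
--     :type n_grams: Generator[tuple[str, tuple[str]], Any, None]
--     :return: the transformed text
--     :rtype: list[str]
--     """
--     text2 = list(text)
--     for placeholder, ngram in n_grams:
--         end = False
--         index = -1
--         length = len(ngram)
--         while not end:
--             try:
--                 # index + 1 to skip the previous match
--                 index = text2.index(ngram[0], index + 1)
--                 if tuple(text2[index:index + length]) == ngram:
--                     # found!
--                     text2[index:index + length] = [placeholder]
--             except ValueError:
--                 end = True
--
--     return text2
-- ===== SOURCE B (Python) =====
-- def replace_ngram(text, n_grams):
--     """Single forward pass per n-gram, building a new token list (no .index,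
--     no in-place slice assignment). Empty n-grams are skipped (A raises there)."""
--     tokens = list(text)
--     for placeholder, ngram in n_grams:
--         ng = list(ngram)
--         if not ng:
--             continue
--         ng0 = ng[0]
--         length = len(ng)
--         out = []
--         i = 0
--         while i < len(tokens):
--             if tokens[i] == ng0 and tokens[i:i + length] == ng:
--                 out.append(placeholder)
--                 i += length
--             else:
--                 out.append(tokens[i])
--                 i += 1
--         tokens = out
--     return tokens
-- ===== Notes on version B (the rewrite author's own statement) =====
-- stated objective: alternative
-- what changed: B replaces per-ngram repeated list.index searches with in-place slice assignment by a single forward pass per n-gram that builds a new token list with an accumulator and a cursor advancing by len(ngram) on a match.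
import Mathlib
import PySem

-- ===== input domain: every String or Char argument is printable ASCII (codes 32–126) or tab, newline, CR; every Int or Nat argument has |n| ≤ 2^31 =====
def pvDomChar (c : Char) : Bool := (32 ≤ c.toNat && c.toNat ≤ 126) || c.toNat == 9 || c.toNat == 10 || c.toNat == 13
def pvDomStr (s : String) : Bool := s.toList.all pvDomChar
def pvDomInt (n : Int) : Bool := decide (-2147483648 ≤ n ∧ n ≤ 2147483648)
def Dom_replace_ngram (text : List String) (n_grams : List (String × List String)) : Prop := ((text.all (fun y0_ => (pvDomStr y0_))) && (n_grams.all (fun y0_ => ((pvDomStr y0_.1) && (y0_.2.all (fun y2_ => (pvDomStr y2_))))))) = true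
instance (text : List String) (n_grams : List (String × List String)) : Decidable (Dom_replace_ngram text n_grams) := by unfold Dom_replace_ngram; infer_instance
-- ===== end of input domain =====

-- B replaces A's repeated .index searches + in-place slice assignment by a single
-- forward accumulator-building pass per n-gram; return values proved equal on Pre_.


-- ===== PORT A =====
-- `text2.index(x, index + 1)`: first index `j ≥ start` with `text2[j] = x`
-- (exact port of Python list.index with a start argument, for `start ≥ 0`,
-- the only case A reaches: `none` = ValueError).
def pyIndexFrom (xs : List String) (x : String) (start : Nat) : Option Nat :=
  ((xs.drop start).findIdx? (fun y => y = x)).map (fun i => i + start)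

-- facts used only for the termination of `innerA` (cited in `decreasing_by`)
lemma pyIndexFrom_bounds {xs : List String} {x : String} {s j : Nat}
    (hf : pyIndexFrom xs x s = some j) : s ≤ j ∧ j < xs.length := by
  unfold pyIndexFrom at hf
  rcases Option.map_eq_some_iff.mp hf with ⟨i, hi, rfl⟩
  have := List.findIdx?_eq_some_iff_findIdx_eq.mp hi
  have hlen : i < (xs.drop s).length := this.1
  simp only [List.length_drop] at hlen
  omega

-- A's `while not end` loop for one (placeholder, ngram) pair, ngram = h :: tl;
-- `start = index + 1`.
def innerA (ph h : String) (tl : List String) (xs : List String) (start : Nat) :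
    List String :=
  match hfind : pyIndexFrom xs h start with
  | none => xs
  | some j =>
    if hm : (xs.drop j).take (h :: tl).length = h :: tl then
      innerA ph h tl (xs.take j ++ ph :: xs.drop (j + (h :: tl).length)) (j + 1)
    else
      innerA ph h tl xs (j + 1)
termination_by xs.length - start
decreasing_by
  · obtain ⟨h1, h2⟩ := pyIndexFrom_bounds hfind
    have hL : (h :: tl).length ≤ (xs.drop j).length := by
      have hc := congrArg List.length hm
      simp only [List.length_take, List.length_cons] at hc
      simp only [List.length_cons]
      omega
    simp only [List.length_drop, List.length_cons] at hL
    simp only [List.length_append, List.length_take, List.length_cons,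
      List.length_drop]
    omega
  · obtain ⟨h1, h2⟩ := pyIndexFrom_bounds hfind
    omega

def replace_ngram (text : List String) (n_grams : List (String × List String)) :
    List String :=
  n_grams.foldl (fun text2 pg =>
    match pg.2 with
    | [] => text2            -- `ngram[0]` raises IndexError: excluded by Pre_
    | h :: tl => innerA pg.1 h tl text2 0) text

-- ===== PORT B =====
-- one forward pass of B's `while i < len(tokens)` loop, ngram = h :: tl;
-- `t = h` is the cheap `tokens[i] == ng0` guard, `ts.drop tl.length` is
-- `tokens[i+length:]`, i.e. `i += length`.
def passB (ph h : String) (tl : List String) : List String → List String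
  | [] => []
  | t :: ts =>
    if t = h ∧ (t :: ts).take (h :: tl).length = h :: tl then
      ph :: passB ph h tl (ts.drop tl.length)
    else
      t :: passB ph h tl ts
termination_by l => l.length
decreasing_by
  · simp [List.length_drop]
  · simp

def replace_ngram_alt (text : List String) (n_grams : List (String × List String)) :
    List String :=
  n_grams.foldl (fun tokens pg =>
    match pg.2 with
    | [] => tokens           -- `if not ng: continue`
    | h :: tl => passB pg.1 h tl tokens) text

-- ===== PRECONDITION & SPEC =====
-- Pre_ excludes inputs where some n-gram's token tuple is empty: there A raises
-- IndexError on `ngram[0]`.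
def Pre_replace_ngram (text : List String) (n_grams : List (String × List String)) : Prop :=
  ∀ pg ∈ n_grams, pg.2 ≠ []
instance (text : List String) (n_grams : List (String × List String)) :
    Decidable (Pre_replace_ngram text n_grams) := by unfold Pre_replace_ngram; infer_instance
def pvWitness_replace_ngram : List String × (List (String × List String)) :=
  (["the", "neural", "network", "model"], [("nn", ["neural", "network"])])

def Spec_replace_ngram (text : List String) (n_grams : List (String × List String)) (out : List String) : Prop := out = replace_ngram_alt text n_grams
instance (text : List String) (n_grams : List (String × List String)) (out : List String) : Decidable (Spec_replace_ngram text n_grams out) := by unfold Spec_replace_ngram; infer_instance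

-- ===== CLAIM (what is proved, stated in full; the proofs are below) =====
def Claim_equal_replace_ngram : Prop := ∀ (text : List String) (n_grams : List (String × List String)), Dom_replace_ngram text n_grams → Pre_replace_ngram text n_grams → Spec_replace_ngram text n_grams (replace_ngram text n_grams)
-- ===== LEMMAS AND PROOFS =====
lemma innerA_none {xs : List String} {ph h : String} {tl : List String} {s : Nat}
    (hf : pyIndexFrom xs h s = none) : innerA ph h tl xs s = xs := by
  rw [innerA.eq_def]
  split
  · rfl
  · rename_i j heq; rw [hf] at heq; cases heq

lemma innerA_some_match {xs : List String} {ph h : String} {tl : List String} {s j : Nat}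
    (hf : pyIndexFrom xs h s = some j)
    (hm : (xs.drop j).take (h :: tl).length = h :: tl) :
    innerA ph h tl xs s
      = innerA ph h tl (xs.take j ++ ph :: xs.drop (j + (h :: tl).length)) (j + 1) := by
  rw [innerA.eq_def]
  split
  · rename_i heq; rw [hf] at heq; cases heq
  · rename_i j' heq; rw [hf] at heq; injection heq with e; subst e; rw [dif_pos hm]

lemma innerA_some_nomatch {xs : List String} {ph h : String} {tl : List String} {s j : Nat}
    (hf : pyIndexFrom xs h s = some j)
    (hm : ¬ (xs.drop j).take (h :: tl).length = h :: tl) :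
    innerA ph h tl xs s = innerA ph h tl xs (j + 1) := by
  rw [innerA.eq_def]
  split
  · rename_i heq; rw [hf] at heq; cases heq
  · rename_i j' heq; rw [hf] at heq; injection heq with e; subst e; rw [dif_neg hm]

lemma pyIndexFrom_skip {xs : List String} {h t : String} {ts : List String} {s : Nat}
    (hd : xs.drop s = t :: ts) (hne : t ≠ h) :
    pyIndexFrom xs h s = pyIndexFrom xs h (s + 1) := by
  unfold pyIndexFrom
  have h2 : xs.drop (s + 1) = ts := by
    have h3 := congrArg (List.drop 1) hd
    rw [List.drop_drop] at h3
    simpa using h3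
  rw [hd, h2, List.findIdx?_cons]
  simp only [hne, decide_false]
  cases ts.findIdx? (fun y => y = h) <;> simp <;> omega

lemma innerA_skip {xs : List String} (ph h : String) (tl : List String) {s : Nat}
    {t : String} {ts : List String}
    (hd : xs.drop s = t :: ts) (hne : t ≠ h) :
    innerA ph h tl xs s = innerA ph h tl xs (s + 1) := by
  have e := pyIndexFrom_skip hd hne
  cases hf : pyIndexFrom xs h (s + 1) with
  | none => rw [innerA_none hf, innerA_none (e.trans hf)]
  | some j =>
    by_cases hm : (xs.drop j).take (h :: tl).length = h :: tl
    · rw [innerA_some_match hf hm, innerA_some_match (e.trans hf) hm]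
    · rw [innerA_some_nomatch hf hm, innerA_some_nomatch (e.trans hf) hm]

lemma pyIndexFrom_head {processed : List String} {h : String} {ts : List String} :
    pyIndexFrom (processed ++ h :: ts) h processed.length = some processed.length := by
  unfold pyIndexFrom
  rw [List.drop_left, List.findIdx?_cons]
  simp

lemma innerA_pass (ph h : String) (tl : List String) :
    ∀ (n : Nat) (rest processed : List String), rest.length ≤ n →
      innerA ph h tl (processed ++ rest) processed.length = processed ++ passB ph h tl rest := by
  intro n
  induction n with
  | zero =>
    intro rest processed hlen
    have hr : rest = [] := List.eq_nil_of_length_eq_zero (Nat.le_zero.mp hlen)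
    subst hr
    rw [innerA_none (by simp [pyIndexFrom]), passB]
  | succ n ih =>
    intro rest processed hlen
    cases rest with
    | nil =>
      rw [innerA_none (by simp [pyIndexFrom]), passB]
    | cons t ts =>
      simp only [List.length_cons, Nat.succ_le_succ_iff] at hlen
      by_cases hm : (t :: ts).take (h :: tl).length = h :: tl
      · have ht : t = h := by
          have := hm
          simp only [List.length_cons, List.take_succ_cons, List.cons.injEq] at this
          exact this.1
        subst ht
        have hf := pyIndexFrom_head (processed := processed) (h := t) (ts := ts)
        have hm' : ((processed ++ t :: ts).drop processed.length).take (t :: tl).length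
            = t :: tl := by rw [List.drop_left]; exact hm
        rw [innerA_some_match hf hm']
        have e1 : (processed ++ t :: ts).take processed.length = processed := by
          simp
        have e2 : (processed ++ t :: ts).drop (processed.length + (t :: tl).length)
            = ts.drop tl.length := by
          rw [List.drop_append, List.drop_eq_nil_of_le (by simp),
              show processed.length + (t :: tl).length - processed.length
                = tl.length + 1 by simp]
          simp
        rw [e1, e2]
        have e3 : processed ++ ph :: ts.drop tl.length
            = (processed ++ [ph]) ++ ts.drop tl.length := by simp
        have e4 : processed.length + 1 = (processed ++ [ph]).length := by simp
        rw [e3, e4, ih (ts.drop tl.length) (processed ++ [ph])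
              (by simp only [List.length_drop]; omega)]
        rw [passB, if_pos ⟨rfl, hm⟩]
        simp
      · have step : innerA ph h tl (processed ++ t :: ts) (processed.length + 1)
            = processed ++ t :: passB ph h tl ts := by
          have e3 : processed ++ t :: ts = (processed ++ [t]) ++ ts := by simp
          have e4 : processed.length + 1 = (processed ++ [t]).length := by simp
          rw [e3, e4, ih ts (processed ++ [t]) hlen]
          simp
        by_cases ht : t = h
        · subst ht
          have hf := pyIndexFrom_head (processed := processed) (h := t) (ts := ts)
          have hm' : ¬ ((processed ++ t :: ts).drop processed.length).take
              (t :: tl).length = t :: tl := by rw [List.drop_left]; exact hm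
          rw [innerA_some_nomatch hf hm', step, passB, if_neg (fun c => hm c.2)]
        · rw [innerA_skip ph h tl
                (show (processed ++ t :: ts).drop processed.length = t :: ts by simp) ht,
              step, passB, if_neg (fun c => hm c.2)]

lemma step_eq (pg : String × List String) (text : List String) :
    (match pg.2 with
      | [] => text
      | h :: tl => innerA pg.1 h tl text 0)
    = (match pg.2 with
      | [] => text
      | h :: tl => passB pg.1 h tl text) := by
  rcases pg with ⟨ph, ngram⟩
  cases ngram with
  | nil => rfl
  | cons h tl =>
    have := innerA_pass ph h tl text.length text [] (Nat.le_refl _)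
    simpa using this

lemma replace_eq (n_grams : List (String × List String)) :
    ∀ text : List String, replace_ngram text n_grams = replace_ngram_alt text n_grams := by
  unfold replace_ngram replace_ngram_alt
  induction n_grams with
  | nil => intro text; rfl
  | cons pg gs ih =>
    intro text
    simp only [List.foldl_cons]
    rw [step_eq pg text]
    exact ih _

-- ===== VERDICT (by name: the statement is the Claim_ definition above) =====
theorem replace_ngram_spec : Claim_equal_replace_ngram := by
  intro text n_grams _ _
  unfold Spec_replace_ngram
  exact replace_eq n_grams text
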